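-- pv_equiv track=rewrite | github.com/rgertenbach/aoc | 2022/day25/part2.py | make_snafu
-- ===== SOURCE A (Python) =====
-- ENCODE = {
--     -2: '=',
--     -1: '-',
--     0: '0',
--     1: '1',
--     2: '2',
-- }
--
-- def make_snafu(v: int) -> str:
--   stack = []
--
--   rem = 0
--   while v:
--     x = v % 5 + rem
--     v //= 5
--     rem = 0
--
--     if x >= 3:
--       x = x - 5
--       rem = 1
--     stack.append(ENCODE[x])
--   if rem:
--     stack.append('1')
--
--
--
--   return ''.join(reversed(stack))
-- ===== SOURCE B (Python) =====
-- ENCODE = {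
--     -2: '=',
--     -1: '-',
--     0: '0',
--     1: '1',
--     2: '2',
-- }
--
-- def make_snafu(v: int) -> str:
--   # Most-significant-digit-first greedy: find the smallest power p = 5**k whose
--   # balanced range [-(p-1)//2, (p-1)//2] contains v, then peel off the top digit
--   # d = round(v / 5**i) at each position, working left to right.  No carry
--   # state, no reversal.
--   p = 1
--   while (p - 1) // 2 < v:
--     p *= 5
--   digits = []
--   while p > 1:
--     p //= 5
--     d = (v + p // 2) // p
--     v -= d * p
--     digits.append(ENCODE[d])
--   return ''.join(digits)
-- ===== Notes on version B (the rewrite author's own statement) =====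
-- stated objective: alternative
-- what changed: A builds the digits least-significant-first with a running carry and reverses at the end; B first finds the smallest power 5**k whose balanced range covers v and then emits digits most-significant-first by greedy rounding (d = (v + p//2)//p, v -= d*p) with no carry state and no reversal.
import Mathlib
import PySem

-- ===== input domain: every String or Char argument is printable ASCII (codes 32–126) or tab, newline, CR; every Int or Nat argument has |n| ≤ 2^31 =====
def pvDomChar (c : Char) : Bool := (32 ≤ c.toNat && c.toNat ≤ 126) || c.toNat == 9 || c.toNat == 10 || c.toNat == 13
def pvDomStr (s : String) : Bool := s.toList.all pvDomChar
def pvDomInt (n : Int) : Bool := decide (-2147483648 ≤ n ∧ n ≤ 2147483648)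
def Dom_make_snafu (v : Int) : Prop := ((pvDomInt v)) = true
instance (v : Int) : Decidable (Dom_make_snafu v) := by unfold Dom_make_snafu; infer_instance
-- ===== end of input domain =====

-- B replaces A's least-significant-first carry loop (plus final reverse) with a
-- most-significant-first greedy: find the smallest power 5^k whose balanced range
-- covers v, then peel the top digit by rounding at each position (objective: alternative).

-- ===== PORT A =====
def ENCODE : PySem.Dict Int Char :=
  PySem.Dict.ofList [(-2, '='), (-1, '-'), (0, '0'), (1, '1'), (2, '2')]

-- ENCODE[x]; the '!' default marks the KeyError branch, unreachable for the digits produced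
def enc (x : Int) : Char := (PySem.Dict.get? ENCODE x).getD '!'

-- the while loop of A; state (v, rem, stack); returns (stack, rem) at exit.
-- Fuel only makes the recursion structural: v.toNat + 1 steps always suffice (v shrinks by // 5),
-- so the 0-fuel branch is unreachable from make_snafu on the admitted inputs (0 ≤ v);
-- on v < 0 the Python loops forever (excluded by Pre_).
def loopA : Nat → Int → Int → List Char → List Char × Int
  | 0, _, rem, stack => (stack, rem)
  | fuel + 1, v, rem, stack =>
    if v ≤ 0 then (stack, rem)
    else
      let x := PySem.Int.mod v 5 + rem
      let v' := PySem.Int.floordiv v 5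
      if x ≥ 3 then loopA fuel v' 1 (stack ++ [enc (x - 5)])
      else loopA fuel v' 0 (stack ++ [enc x])

def make_snafu (v : Int) : String :=
  let p := loopA (v.toNat + 1) v 0 []
  let stack := if p.2 ≠ 0 then p.1 ++ ['1'] else p.1
  String.ofList stack.reverse

-- ===== PORT B =====
-- the first while loop of B: p *= 5 until (p - 1) // 2 ≥ v.
-- Fuel only makes the recursion structural: v.toNat + 1 steps always suffice.
def loopP : Nat → Int → Int → Int
  | 0, _, p => p
  | fuel + 1, v, p =>
    if PySem.Int.floordiv (p - 1) 2 < v then loopP fuel v (p * 5) else p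

-- the second while loop of B: while p > 1: p //= 5; d = (v + p//2)//p; v -= d*p; append ENCODE[d].
-- Fuel only makes the recursion structural: p.natAbs steps always suffice (p is 5^k).
def loopD : Nat → Int → Int → List Char → List Char
  | 0, _, _, digits => digits
  | fuel + 1, v, p, digits =>
    if 1 < p then
      let p' := PySem.Int.floordiv p 5
      let d := PySem.Int.floordiv (v + PySem.Int.floordiv p' 2) p'
      loopD fuel (v - d * p') p' (digits ++ [enc d])
    else digits

def make_snafu_alt (v : Int) : String :=
  let p := loopP (v.toNat + 1) v 1
  String.ofList (loopD p.natAbs v p [])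

-- ===== PRECONDITION & SPEC =====
-- A's while loop never terminates for v < 0 (v //= 5 gets stuck at -1), so A only returns on 0 ≤ v.
def Pre_make_snafu (v : Int) : Prop := 0 ≤ v
instance (v : Int) : Decidable (Pre_make_snafu v) := by unfold Pre_make_snafu; infer_instance
def pvWitness_make_snafu : Int := (2022)

def Spec_make_snafu (v : Int) (out : String) : Prop := out = make_snafu_alt v
instance (v : Int) (out : String) : Decidable (Spec_make_snafu v out) := by unfold Spec_make_snafu; infer_instance

-- ===== CLAIM (what is proved, stated in full; the proofs are below) =====
def Claim_equal_make_snafu : Prop := ∀ (v : Int), Dom_make_snafu v → Pre_make_snafu v → Spec_make_snafu v (make_snafu v)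

-- ===== LEMMAS AND PROOFS =====

-- proof-side: the divmod(v+2,5) characterisation of the SNAFU digit string
def cch (r : Int) : Char := (PySem.Str.pyGet? "=-012" r).getD '!'

lemma sdig_dec (v : Int) (h : ¬ v = 0) : ((v + 2) / 5).natAbs < v.natAbs := by omega

def sdig (v : Int) : List Char :=
  if h : v = 0 then [] else sdig ((v + 2) / 5) ++ [cch ((v + 2) % 5)]
termination_by v.natAbs
decreasing_by exact sdig_dec v h

def loopB : Nat → Int → List Char → List Char
  | 0, _, out => out
  | fuel + 1, v, out =>
    if v = 0 then out
    else
      let q := PySem.Int.floordiv (v + 2) 5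
      let r := PySem.Int.mod (v + 2) 5
      loopB fuel q (cch r :: out)

lemma sdig_eq (v : Int) (h : v ≠ 0) :
    sdig v = sdig ((v + 2) / 5) ++ [cch ((v + 2) % 5)] := by
  rw [sdig]; simp [h]

lemma sdig_zero : sdig 0 = [] := by rw [sdig]; simp

lemma loopB_stop (fuel : Nat) (acc : List Char) : loopB (fuel + 1) 0 acc = acc := by
  simp [loopB]

lemma loopB_step (fuel : Nat) (v : Int) (acc : List Char) (h : v ≠ 0) :
    loopB (fuel + 1) v acc = loopB fuel (PySem.Int.floordiv (v + 2) 5)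
      (cch (PySem.Int.mod (v + 2) 5) :: acc) := by
  simp [loopB, h]

lemma loopB_sdig : ∀ (f : Nat) (v : Int) (acc : List Char), v.natAbs < f →
    loopB f v acc = sdig v ++ acc := by
  intro f
  induction f with
  | zero => intro v acc h; exact absurd h (Nat.not_lt_zero _)
  | succ n ih =>
    intro v acc h
    by_cases hv : v = 0
    · subst hv; rw [loopB_stop, sdig_zero]; simp
    · rw [loopB_step n v acc hv,
        PySem.Int.floordiv_eq_ediv_of_pos (by norm_num : (0:Int) < 5),
        PySem.Int.mod_eq_emod_of_pos (by norm_num : (0:Int) < 5),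
        ih ((v + 2) / 5) _ (by have := sdig_dec v hv; omega),
        sdig_eq v hv]
      simp

lemma loopA_stop (fuel : Nat) (v rem : Int) (stack : List Char) (h : v ≤ 0) :
    loopA (fuel + 1) v rem stack = (stack, rem) := by
  simp [loopA, h]

lemma loopA_step (fuel : Nat) (v rem : Int) (stack : List Char) (h : ¬ v ≤ 0) :
    loopA (fuel + 1) v rem stack =
      if PySem.Int.mod v 5 + rem ≥ 3
      then loopA fuel (PySem.Int.floordiv v 5) 1 (stack ++ [enc (PySem.Int.mod v 5 + rem - 5)])
      else loopA fuel (PySem.Int.floordiv v 5) 0 (stack ++ [enc (PySem.Int.mod v 5 + rem)]) := by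
  simp [loopA, h]

-- A's post-processed, reversed stack equals the divmod-built list for the running value v + rem,
-- once each side has enough fuel.
lemma loopA_eq_loopB : ∀ (fA fB : Nat) (v rem : Int) (stack : List Char),
    v.toNat < fA → (v + rem).natAbs < fB → 0 ≤ v → (rem = 0 ∨ rem = 1) →
    (if (loopA fA v rem stack).2 ≠ 0 then (loopA fA v rem stack).1 ++ ['1'] else (loopA fA v rem stack).1).reverse
      = loopB fB (v + rem) stack.reverse := by
  intro fA
  induction fA with
  | zero =>
    intro fB v rem stack hfa
    exact absurd hfa (Nat.not_lt_zero _)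
  | succ n ih =>
    intro fB v rem stack hfa hfb hv hrem
    by_cases hvle : v ≤ 0
    · have hv0 : v = 0 := le_antisymm hvle hv
      subst hv0
      rw [loopA_stop n 0 rem stack le_rfl]
      rcases hrem with rfl | rfl
      · obtain ⟨m, rfl⟩ : ∃ m, fB = m + 1 := ⟨fB - 1, by omega⟩
        simpa using loopB_stop m stack.reverse |>.symm
      · obtain ⟨m, rfl⟩ : ∃ m, fB = m + 2 := ⟨fB - 2, by omega⟩
        have h1 : ((0 : Int) + 1) = 1 := by norm_num
        rw [h1, loopB_step (m + 1) 1 _ (by norm_num)]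
        have h2 : PySem.Int.floordiv ((1 : Int) + 2) 5 = 0 := by decide
        have h3 : cch (PySem.Int.mod ((1 : Int) + 2) 5) = '1' := by decide
        rw [h2, h3, loopB_stop m]
        simp
    · obtain ⟨m, rfl⟩ : ∃ m, fB = m + 1 := ⟨fB - 1, by omega⟩
      rw [loopA_step n v rem stack hvle]
      have hm' : PySem.Int.mod v 5 = v % 5 := PySem.Int.mod_eq_emod_of_pos (by norm_num)
      have hq' : PySem.Int.floordiv v 5 = v / 5 := PySem.Int.floordiv_eq_ediv_of_pos (by norm_num)
      rw [hm', hq']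
      have h1 : (v / 5).toNat < n := by omega
      have hrb : 0 ≤ rem ∧ rem ≤ 1 := by rcases hrem with rfl | rfl <;> norm_num
      have h2 : 0 ≤ v / 5 := by omega
      by_cases hx : v % 5 + rem ≥ 3
      · rw [if_pos hx]
        rw [ih m (v / 5) 1 (stack ++ [enc (v % 5 + rem - 5)]) h1 (by omega) h2 (Or.inr rfl)]
        rw [loopB_step m (v + rem) _ (by omega)]
        have hdiv : PySem.Int.floordiv (v + rem + 2) 5 = v / 5 + 1 := by
          rw [PySem.Int.floordiv_eq_ediv_of_pos (by norm_num)]; omega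
        have hmod : PySem.Int.mod (v + rem + 2) 5 = v % 5 + rem - 3 := by
          rw [PySem.Int.mod_eq_emod_of_pos (by norm_num)]; omega
        have hk5 : v % 5 + rem ≤ 5 := by omega
        have hchar : cch (PySem.Int.mod (v + rem + 2) 5) = enc (v % 5 + rem - 5) := by
          rw [hmod]
          obtain ⟨k, hkeq⟩ : ∃ k, k = v % 5 + rem := ⟨_, rfl⟩
          rw [← hkeq] at hx hk5 ⊢
          interval_cases k <;> decide
        rw [hdiv, hchar]
        simp
      · rw [if_neg hx]
        rw [ih m (v / 5) 0 (stack ++ [enc (v % 5 + rem)]) h1 (by omega) h2 (Or.inl rfl)]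
        rw [loopB_step m (v + rem) _ (by omega)]
        have hdiv : PySem.Int.floordiv (v + rem + 2) 5 = v / 5 := by
          rw [PySem.Int.floordiv_eq_ediv_of_pos (by norm_num)]; omega
        have hmod : PySem.Int.mod (v + rem + 2) 5 = v % 5 + rem + 2 := by
          rw [PySem.Int.mod_eq_emod_of_pos (by norm_num)]; omega
        have hk0 : 0 ≤ v % 5 + rem := by omega
        have hchar : cch (PySem.Int.mod (v + rem + 2) 5) = enc (v % 5 + rem) := by
          rw [hmod]
          obtain ⟨k, hkeq⟩ : ∃ k, k = v % 5 + rem := ⟨_, rfl⟩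
          rw [← hkeq] at hx hk0 ⊢
          have hk2 : k ≤ 2 := by omega
          interval_cases k <;> decide
        rw [hdiv, hchar]
        simp

-- A's value is the divmod digit string
lemma make_snafu_sdig (v : Int) (hv : 0 ≤ v) : make_snafu v = String.ofList (sdig v) := by
  unfold make_snafu
  have h := loopA_eq_loopB (v.toNat + 1) (v.natAbs + 1) v 0 [] (by omega) (by omega) hv (Or.inl rfl)
  simp only [add_zero, List.reverse_nil] at h
  simp only []
  rw [h, loopB_sdig (v.natAbs + 1) v [] (by omega)]
  simp

-- arithmetic helpers about 5^k
lemma five_pow_pos (k : Nat) : (1 : Int) ≤ 5 ^ k := one_le_pow₀ (by norm_num)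

lemma five_pow_odd (k : Nat) : (5 : Int) ^ k % 2 = 1 := by
  induction k with
  | zero => decide
  | succ n ih =>
    have h : (5 : Int) ^ (n + 1) = 5 ^ n * 5 := pow_succ 5 n
    have := five_pow_pos n
    omega

lemma five_pow_big (n : Nat) : 2 * (n : Int) + 1 ≤ 5 ^ n := by
  induction n with
  | zero => decide
  | succ m ih =>
    have h : (5 : Int) ^ (m + 1) = 5 ^ m * 5 := pow_succ 5 m
    have := five_pow_pos m
    push_cast
    push_cast at ih
    omega

-- length of the digit string: upper bound
lemma len_sdig_le : ∀ (k : Nat) (v : Int), 2 * (v.natAbs : Int) ≤ (5:Int) ^ k - 1 → (sdig v).length ≤ k := by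
  intro k
  induction k with
  | zero =>
    intro v h
    have h1 : (5:Int) ^ 0 = 1 := pow_zero 5
    have h0 : v = 0 := by omega
    subst h0; simp [sdig_zero]
  | succ n ih =>
    intro v h
    by_cases hv : v = 0
    · subst hv; simp [sdig_zero]
    · rw [sdig_eq v hv]
      have hP := five_pow_pos n
      have hodd := five_pow_odd n
      have h5 : (5:Int) ^ (n + 1) = 5 ^ n * 5 := pow_succ 5 n
      have hq : 2 * ((((v + 2) / 5).natAbs : Int)) ≤ (5:Int) ^ n - 1 := by omega
      have := ih ((v + 2) / 5) hq
      simp only [List.length_append, List.length_cons, List.length_nil]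
      omega

-- length of the digit string: lower bound
lemma len_sdig_ge : ∀ (k : Nat) (v : Int), (5 : Int) ^ k ≤ 2 * (v.natAbs : Int) → k + 1 ≤ (sdig v).length := by
  intro k
  induction k with
  | zero =>
    intro v h
    have h1 : (5:Int) ^ 0 = 1 := pow_zero 5
    have hv : v ≠ 0 := by intro h0; subst h0; simp at h
    rw [sdig_eq v hv]
    simp only [List.length_append, List.length_cons, List.length_nil]
    omega
  | succ n ih =>
    intro v h
    have hP := five_pow_pos n
    have hodd := five_pow_odd n
    have h5 : (5:Int) ^ (n + 1) = 5 ^ n * 5 := pow_succ 5 n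
    have hv : v ≠ 0 := by intro h0; subst h0; simp at h; omega
    rw [sdig_eq v hv]
    have hq : (5:Int) ^ n ≤ 2 * ((((v + 2) / 5).natAbs : Int)) := by omega
    have := ih ((v + 2) / 5) hq
    simp only [List.length_append, List.length_cons, List.length_nil]
    omega

lemma enc_cch (d : Int) (h1 : -2 ≤ d) (h2 : d ≤ 2) : enc d = cch (d + 2) := by
  interval_cases d <;> decide

lemma sdig_digit (d : Int) (h1 : -2 ≤ d) (h2 : d ≤ 2) (h3 : d ≠ 0) : sdig d = [cch (d + 2)] := by
  interval_cases d
  · rw [sdig_eq (-2) (by norm_num)]; norm_num [sdig_zero]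
  · rw [sdig_eq (-1) (by norm_num)]; norm_num [sdig_zero]
  · exact absurd rfl h3
  · rw [sdig_eq 1 (by norm_num)]; norm_num [sdig_zero]
  · rw [sdig_eq 2 (by norm_num)]; norm_num [sdig_zero]


-- peeling the top digit: the digit string of d*5^k + w starts with d and then w's string padded with zeros
lemma sdig_split : ∀ (k : Nat) (d w : Int), -2 ≤ d → d ≤ 2 → d ≠ 0 → 2 * (w.natAbs : Int) ≤ (5:Int) ^ k - 1 →
    sdig (d * 5 ^ k + w) = cch (d + 2) :: (List.replicate (k - (sdig w).length) '0' ++ sdig w) := by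
  intro k
  induction k with
  | zero =>
    intro d w h1 h2 h3 h4
    have h5 : (5:Int) ^ 0 = 1 := pow_zero 5
    have hw : w = 0 := by omega
    subst hw
    have hd : d * 5 ^ 0 + 0 = d := by ring
    rw [hd, sdig_zero]
    simp only [List.length_nil, Nat.sub_zero, List.replicate_zero,
      List.append_nil]
    exact sdig_digit d h1 h2 h3
  | succ n ih =>
    intro d w h1 h2 h3 h4
    have hP := five_pow_pos n
    have hodd := five_pow_odd n
    have h5 : (5:Int) ^ (n + 1) = 5 ^ n * 5 := pow_succ 5 n
    have hu : (w + 2) / 5 * 5 + (w + 2) % 5 = w + 2 := Int.ediv_mul_add_emod (w + 2) 5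
    have hub : 2 * ((((w + 2) / 5).natAbs : Int)) ≤ (5:Int) ^ n - 1 := by omega
    have hv0 : d * 5 ^ (n + 1) + w ≠ 0 := by interval_cases d <;> omega
    rw [sdig_eq _ hv0]
    have hdiv : (d * 5 ^ (n + 1) + w + 2) / 5 = d * 5 ^ n + (w + 2) / 5 := by
      interval_cases d <;> omega
    have hmod : (d * 5 ^ (n + 1) + w + 2) % 5 = (w + 2) % 5 := by
      interval_cases d <;> omega
    rw [hdiv, hmod, ih d ((w + 2) / 5) h1 h2 h3 hub]
    by_cases hw : w = 0
    · subst hw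
      have hu0 : (0 + 2 : Int) / 5 = 0 := by decide
      have he2 : (0 + 2 : Int) % 5 = 2 := by decide
      rw [hu0, he2, sdig_zero]
      have hc : cch 2 = '0' := by decide
      simp [hc, List.replicate_succ']
    · have hwu : sdig w = sdig ((w + 2) / 5) ++ [cch ((w + 2) % 5)] := sdig_eq w hw
      rw [hwu]
      simp [List.length_append, List.append_assoc, Nat.succ_sub_succ]

-- proof-side most-significant-first greedy, as produced by loopD
def greedy : Nat → Int → List Char
  | 0, _ => []
  | k + 1, v =>
    let P : Int := 5 ^ k
    let d := (v + P / 2) / P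
    enc d :: greedy k (v - d * P)

lemma greedy_eq : ∀ (k : Nat) (v : Int), 2 * (v.natAbs : Int) ≤ (5:Int) ^ k - 1 →
    greedy k v = List.replicate (k - (sdig v).length) '0' ++ sdig v := by
  intro k
  induction k with
  | zero =>
    intro v h
    have h1 : (5:Int) ^ 0 = 1 := pow_zero 5
    have h0 : v = 0 := by omega
    subst h0; simp [greedy, sdig_zero]
  | succ n ih =>
    intro v h
    have hP := five_pow_pos n
    have hPpos : (0:Int) < 5 ^ n := by omega
    have hodd := five_pow_odd n
    have h5 : (5:Int) ^ (n + 1) = 5 ^ n * 5 := pow_succ 5 n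
    show enc ((v + (5:Int) ^ n / 2) / 5 ^ n) ::
        greedy n (v - (v + (5:Int) ^ n / 2) / 5 ^ n * 5 ^ n) = _
    have hd1 : -2 ≤ (v + (5:Int) ^ n / 2) / 5 ^ n := by
      rw [Int.le_ediv_iff_mul_le hPpos]; omega
    have hd2 : (v + (5:Int) ^ n / 2) / 5 ^ n < 3 := by
      rw [Int.ediv_lt_iff_lt_mul hPpos]; omega
    have hq := Int.mul_ediv_add_emod (v + (5:Int) ^ n / 2) (5 ^ n)
    have hr0 : 0 ≤ (v + (5:Int) ^ n / 2) % 5 ^ n := Int.emod_nonneg _ (by omega)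
    have hr1 : (v + (5:Int) ^ n / 2) % 5 ^ n < 5 ^ n := Int.emod_lt_of_pos _ hPpos
    have hvd : v - (v + (5:Int) ^ n / 2) / 5 ^ n * 5 ^ n
        = (v + (5:Int) ^ n / 2) % 5 ^ n - 5 ^ n / 2 := by linarith [hq]
    have hvb : 2 * (((v - (v + (5:Int) ^ n / 2) / 5 ^ n * 5 ^ n).natAbs : Int))
        ≤ (5:Int) ^ n - 1 := by rw [hvd]; omega
    by_cases hd0 : (v + (5:Int) ^ n / 2) / 5 ^ n = 0
    · rw [hd0] at hvb ⊢
      have hvv : v - 0 * (5:Int) ^ n = v := by ring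
      rw [hvv] at hvb ⊢
      rw [ih v hvb]
      have henc : enc 0 = '0' := by decide
      have hlen : (sdig v).length ≤ n := len_sdig_le n v hvb
      have hcount : n + 1 - (sdig v).length = (n - (sdig v).length) + 1 := by omega
      rw [henc, hcount, List.replicate_succ]
      simp
    · have hsplit := sdig_split n ((v + (5:Int) ^ n / 2) / 5 ^ n)
        (v - (v + (5:Int) ^ n / 2) / 5 ^ n * 5 ^ n) hd1 (by omega) hd0 hvb
      have hvv : (v + (5:Int) ^ n / 2) / 5 ^ n * 5 ^ n
          + (v - (v + (5:Int) ^ n / 2) / 5 ^ n * 5 ^ n) = v := by ring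
      rw [hvv] at hsplit
      have hlenu : (sdig (v - (v + (5:Int) ^ n / 2) / 5 ^ n * 5 ^ n)).length ≤ n :=
        len_sdig_le n _ hvb
      have hlen : (sdig v).length = n + 1 := by
        rw [hsplit]
        simp only [List.length_cons, List.length_append, List.length_replicate]
        omega
      rw [hlen, Nat.sub_self, List.replicate_zero, List.nil_append,
        ih _ hvb, hsplit, enc_cch _ hd1 (by omega)]

-- loopP returns the smallest covering power of 5 at or above its argument
lemma loopP_out : ∀ (f j : Nat) (v : Int), 2 * v ≤ (5:Int) ^ (j + f) - 1 →
    ∃ k : Nat, loopP f v ((5:Int) ^ j) = (5:Int) ^ k ∧ j ≤ k ∧ 2 * v ≤ (5:Int) ^ k - 1 ∧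
      (j < k → (5:Int) ^ (k - 1) ≤ 2 * v) := by
  intro f
  induction f with
  | zero =>
    intro j v h
    exact ⟨j, rfl, le_rfl, by simpa using h, fun hh => absurd hh (Nat.lt_irrefl j)⟩
  | succ n ih =>
    intro j v h
    have hPj := five_pow_pos j
    have hoddj := five_pow_odd j
    have hstep : loopP (n + 1) v ((5:Int) ^ j)
        = if PySem.Int.floordiv ((5:Int) ^ j - 1) 2 < v
          then loopP n v ((5:Int) ^ j * 5) else (5:Int) ^ j := rfl
    rw [hstep, PySem.Int.floordiv_eq_ediv_of_pos (by norm_num : (0:Int) < 2)]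
    by_cases hc : ((5:Int) ^ j - 1) / 2 < v
    · rw [if_pos hc]
      have hpow : (5:Int) ^ j * 5 = 5 ^ (j + 1) := (pow_succ 5 j).symm
      rw [hpow]
      have h' : 2 * v ≤ (5:Int) ^ ((j + 1) + n) - 1 := by
        have he : (j + 1) + n = j + (n + 1) := by omega
        rw [he]; exact h
      obtain ⟨k, hk1, hk2, hk3, hk4⟩ := ih (j + 1) v h'
      refine ⟨k, hk1, by omega, hk3, ?_⟩
      intro hjk
      rcases Nat.lt_or_ge (j + 1) k with hlt | hge
      · exact hk4 hlt
      · have hkj : k = j + 1 := by omega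
        subst hkj
        have hj : (5:Int) ^ j ≤ 2 * v := by omega
        simpa using hj
    · rw [if_neg hc]
      exact ⟨j, rfl, le_rfl, by omega, fun hh => absurd hh (Nat.lt_irrefl j)⟩

-- loopD computes the greedy digits
lemma loopD_greedy : ∀ (k : Nat) (f : Nat) (v : Int) (acc : List Char), k < f →
    loopD f v ((5:Int) ^ k) acc = acc ++ greedy k v := by
  intro k
  induction k with
  | zero =>
    intro f v acc hf
    obtain ⟨m, rfl⟩ : ∃ m, f = m + 1 := ⟨f - 1, by omega⟩
    rw [pow_zero]
    simp [loopD, greedy]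
  | succ n ih =>
    intro f v acc hf
    obtain ⟨m, rfl⟩ : ∃ m, f = m + 1 := ⟨f - 1, by omega⟩
    have hP := five_pow_pos n
    have h5 : (5:Int) ^ (n + 1) = 5 ^ n * 5 := pow_succ 5 n
    have hgt : (1:Int) < 5 ^ (n + 1) := by omega
    have hp' : PySem.Int.floordiv ((5:Int) ^ (n + 1)) 5 = 5 ^ n := by
      rw [PySem.Int.floordiv_eq_ediv_of_pos (by norm_num : (0:Int) < 5), pow_succ]
      exact Int.mul_ediv_cancel _ (by norm_num)
    show (if 1 < (5:Int) ^ (n + 1) then _ else acc) = _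
    rw [if_pos hgt]
    simp only [hp',
      PySem.Int.floordiv_eq_ediv_of_pos (show (0:Int) < 2 by norm_num),
      PySem.Int.floordiv_eq_ediv_of_pos (show (0:Int) < (5:Int) ^ n by omega)]
    rw [ih m _ _ (by omega)]
    show (acc ++ [enc ((v + (5:Int) ^ n / 2) / 5 ^ n)])
        ++ greedy n (v - (v + (5:Int) ^ n / 2) / 5 ^ n * 5 ^ n) = _
    simp [greedy, List.append_assoc]

-- ===== VERDICT (by name: the statement is the Claim_ definition above) =====
theorem make_snafu_spec : Claim_equal_make_snafu := by
  intro v _ hv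
  have hv0 : 0 ≤ v := hv
  unfold Spec_make_snafu
  rw [make_snafu_sdig v hv0]
  unfold make_snafu_alt
  simp only []
  have hz : 0 + (v.toNat + 1) = v.toNat + 1 := by omega
  have hcov : 2 * v ≤ (5:Int) ^ (0 + (v.toNat + 1)) - 1 := by
    rw [hz]
    have := five_pow_big (v.toNat + 1)
    omega
  obtain ⟨k, hp, -, hk1, hk2⟩ := loopP_out (v.toNat + 1) 0 v hcov
  rw [show (1 : Int) = 5 ^ 0 from rfl, hp]
  have hnat : ((5:Int) ^ k).natAbs = 5 ^ k := by
    simp [Int.natAbs_pow]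
  rw [hnat, loopD_greedy k (5 ^ k) v [] (Nat.lt_pow_self (by norm_num))]
  have hle : (sdig v).length ≤ k := len_sdig_le k v (by rw [Int.natAbs_of_nonneg hv0]; exact hk1)
  have hge : k ≤ (sdig v).length := by
    rcases Nat.eq_zero_or_pos k with h0 | h0
    · omega
    · have h5 : (5:Int) ^ (k - 1) ≤ 2 * v.natAbs := by
        have := hk2 (by omega)
        omega
      have := len_sdig_ge (k - 1) v h5
      omega
  rw [greedy_eq k v (by omega)]
  have : k - (sdig v).length = 0 := by omega
  rw [this]
  simp
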